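-- pv_equiv track=rewrite | github.com/v4mpir0ck/agent-linux | alertas.py | sugerir_alertas
-- ===== SOURCE A (Python) =====
-- def sugerir_alertas(problemas):
--     # problemas: lista de strings con problemas detectados
--     alertas = []
--     for problema in problemas:
--         if 'memoria' in problema:
--             alertas.append('Posible falta de RAM, revisar procesos y swap.')
--         elif 'disco' in problema:
--             alertas.append('Espacio en disco bajo, liberar espacio o ampliar.')
--         elif 'cpu' in problema:
--             alertas.append('CPU alta, revisar procesos consumidores.')
--         elif 'red' in problema:
--             alertas.append('Problemas de red, comprobar conectividad y configuración.')
--         else: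
--             alertas.append(f'Revisar: {problema}')
--     return '\n'.join(alertas)
-- ===== SOURCE B (Python) =====
-- ALERT_TABLE = [
--     ('memoria', 'Posible falta de RAM, revisar procesos y swap.'),
--     ('disco', 'Espacio en disco bajo, liberar espacio o ampliar.'),
--     ('cpu', 'CPU alta, revisar procesos consumidores.'),
--     ('red', 'Problemas de red, comprobar conectividad y configuración.'),
-- ]
--
-- def sugerir_alertas(problemas):
--     # Staged sweeps: one pass over the whole input per keyword (in priority
--     # order), filling only the still-unresolved slots; a final pass fills
--     # the default. Correct because a slot, once filled, is never overwritten,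
--     # so each item ends with the message of its highest-priority keyword.
--     res = [None] * len(problemas)
--     for kw, msg in ALERT_TABLE:
--         res = [msg if r is None and kw in p else r
--                for r, p in zip(res, problemas)]
--     return '\n'.join(r if r is not None else f'Revisar: {p}'
--                      for r, p in zip(res, problemas))
-- ===== Notes on version B (the rewrite author's own statement) =====
-- stated objective: alternative
-- what changed: Replaces A's single per-item if/elif dispatch by staged whole-list sweeps: one pass over the input per keyword in priority order filling still-unresolved slots of a parallel result list, then a final default-filling join pass.
import Mathlib
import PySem

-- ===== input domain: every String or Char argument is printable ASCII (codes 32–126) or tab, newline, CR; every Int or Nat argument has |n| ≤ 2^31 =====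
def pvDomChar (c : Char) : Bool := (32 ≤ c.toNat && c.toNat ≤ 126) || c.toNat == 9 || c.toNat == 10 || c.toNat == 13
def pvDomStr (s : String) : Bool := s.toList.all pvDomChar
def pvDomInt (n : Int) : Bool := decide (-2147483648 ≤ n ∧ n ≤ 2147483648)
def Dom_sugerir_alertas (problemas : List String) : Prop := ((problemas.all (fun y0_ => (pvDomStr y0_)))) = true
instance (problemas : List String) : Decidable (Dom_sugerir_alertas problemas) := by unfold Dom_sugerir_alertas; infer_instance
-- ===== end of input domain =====

-- B replaces A's per-item if/elif dispatch by staged sweeps: one whole-list pass per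
-- keyword in priority order, filling still-unresolved slots; objective: alternative.


-- ===== PORT A =====
def sugerir_alertas (problemas : List String) : String :=
  let alertas : List String := problemas.foldl (fun alertas problema =>
    if PySem.Str.isIn "memoria" problema then
      alertas ++ ["Posible falta de RAM, revisar procesos y swap."]
    else if PySem.Str.isIn "disco" problema then
      alertas ++ ["Espacio en disco bajo, liberar espacio o ampliar."]
    else if PySem.Str.isIn "cpu" problema then
      alertas ++ ["CPU alta, revisar procesos consumidores."]
    else if PySem.Str.isIn "red" problema then
      alertas ++ ["Problemas de red, comprobar conectividad y configuración."]
    else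
      alertas ++ ["Revisar: " ++ problema]) []
  PySem.Str.join "\n" alertas

-- ===== PORT B =====
def alertTable : List (String × String) :=
  [("memoria", "Posible falta de RAM, revisar procesos y swap."),
   ("disco", "Espacio en disco bajo, liberar espacio o ampliar."),
   ("cpu", "CPU alta, revisar procesos consumidores."),
   ("red", "Problemas de red, comprobar conectividad y configuración.")]

-- one sweep: res = [msg if r is None and kw in p else r for r, p in zip(res, problemas)]
def sweep (problemas : List String) (res : List (Option String)) (kwmsg : String × String) :
    List (Option String) :=
  List.zipWith (fun r p => if r = none ∧ PySem.Str.isIn kwmsg.1 p then some kwmsg.2 else r)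
    res problemas

def sugerir_alertas_alt (problemas : List String) : String :=
  -- res = [None] * len(problemas)
  let res0 : List (Option String) := problemas.map (fun _ => none)
  let res := alertTable.foldl (sweep problemas) res0
  PySem.Str.join "\n"
    (List.zipWith (fun r p => match r with | some m => m | none => "Revisar: " ++ p)
      res problemas)

-- ===== PRECONDITION & SPEC =====
def Spec_sugerir_alertas (problemas : List String) (out : String) : Prop := out = sugerir_alertas_alt problemas
instance (problemas : List String) (out : String) : Decidable (Spec_sugerir_alertas problemas out) := by unfold Spec_sugerir_alertas; infer_instance

-- ===== CLAIM (what is proved, stated in full; the proofs are below) =====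
def Claim_equal_sugerir_alertas : Prop := ∀ (problemas : List String), Dom_sugerir_alertas problemas → Spec_sugerir_alertas problemas (sugerir_alertas problemas)

-- ===== LEMMAS AND PROOFS =====

-- zipping a pointwise image of l against l itself is a map over l
theorem zipWith_map_left_self {α β γ : Type} (g : β → α → γ) (f : α → β) (l : List α) :
    List.zipWith g (l.map f) l = l.map (fun p => g (f p) p) := by
  induction l with
  | nil => rfl
  | cons a t ih => simp [ih]

-- the staged sweeps over any table, started from a pointwise state, act pointwise
theorem foldl_sweep_map (problemas : List String) (T : List (String × String)) :
    ∀ f : String → Option String,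
    T.foldl (sweep problemas) (problemas.map f)
      = problemas.map (fun p =>
          T.foldl (fun o km => if o = none ∧ PySem.Str.isIn km.1 p then some km.2 else o) (f p)) := by
  induction T with
  | nil => intro f; simp
  | cons km T ih =>
      intro f
      have h1 : sweep problemas (problemas.map f) km
          = problemas.map (fun p => if f p = none ∧ PySem.Str.isIn km.1 p then some km.2 else f p) := by
        simp [sweep, zipWith_map_left_self]
      simp only [List.foldl_cons, h1, ih]

-- per item: the keyword sweeps followed by default-filling compute A's cascade
theorem perItem_eq_cascade (p : String) :
    (match alertTable.foldl
        (fun o km => if o = none ∧ PySem.Str.isIn km.1 p then some km.2 else o) none with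
     | some m => m
     | none => "Revisar: " ++ p)
    = (if PySem.Str.isIn "memoria" p then "Posible falta de RAM, revisar procesos y swap."
       else if PySem.Str.isIn "disco" p then "Espacio en disco bajo, liberar espacio o ampliar."
       else if PySem.Str.isIn "cpu" p then "CPU alta, revisar procesos consumidores."
       else if PySem.Str.isIn "red" p then "Problemas de red, comprobar conectividad y configuración."
       else "Revisar: " ++ p) := by
  simp only [alertTable, List.foldl_cons, List.foldl_nil]
  split_ifs <;> simp_all

-- ===== VERDICT (by name: the statement is the Claim_ definition above) =====
theorem sugerir_alertas_spec : Claim_equal_sugerir_alertas := by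
  intro problemas _
  unfold Spec_sugerir_alertas sugerir_alertas sugerir_alertas_alt
  simp only [foldl_sweep_map, zipWith_map_left_self, perItem_eq_cascade]
  rw [show (fun (alertas : List String) (problema : String) =>
        if PySem.Str.isIn "memoria" problema then
          alertas ++ ["Posible falta de RAM, revisar procesos y swap."]
        else if PySem.Str.isIn "disco" problema then
          alertas ++ ["Espacio en disco bajo, liberar espacio o ampliar."]
        else if PySem.Str.isIn "cpu" problema then
          alertas ++ ["CPU alta, revisar procesos consumidores."]
        else if PySem.Str.isIn "red" problema then
          alertas ++ ["Problemas de red, comprobar conectividad y configuración."]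
        else
          alertas ++ ["Revisar: " ++ problema])
      = fun alertas problema => alertas ++
          [if PySem.Str.isIn "memoria" problema then "Posible falta de RAM, revisar procesos y swap."
           else if PySem.Str.isIn "disco" problema then "Espacio en disco bajo, liberar espacio o ampliar."
           else if PySem.Str.isIn "cpu" problema then "CPU alta, revisar procesos consumidores."
           else if PySem.Str.isIn "red" problema then "Problemas de red, comprobar conectividad y configuración."
           else "Revisar: " ++ problema] from by
    funext alertas problema; split_ifs <;> rfl]
  rw [PySem.List.foldl_append_singleton_eq_map]
  simp
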